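-- pv_equiv track=rewrite | github.com/iek-bit/Gambly | poker_bots.py | _has_flush_draw
-- ===== SOURCE A (Python) =====
-- def _has_flush_draw(hole_cards, board_cards):
--     cards = list(hole_cards) + list(board_cards)
--     if len(cards) < 4:
--         return False
--     suit_counts = {}
--     for card in cards:
--         suit_counts[card[1]] = suit_counts.get(card[1], 0) + 1
--     return max(suit_counts.values()) >= 4
-- ===== SOURCE B (Python) =====
-- def _has_flush_draw(hole_cards, board_cards):
--     cards = list(hole_cards) + list(board_cards)
--     if len(cards) < 4:
--         return False
--     suits = sorted(card[1] for card in cards)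
--     best = 0
--     run = 0
--     prev = None
--     for s in suits:
--         run = run + 1 if s == prev else 1
--         prev = s
--         if run > best:
--             best = run
--     return best >= 4
-- ===== Notes on version B (the rewrite author's own statement) =====
-- stated objective: alternative
-- what changed: Replaced the suit->count dictionary and max over dict values by sorting the suit characters and a single run-length scan over the sorted list, returning whether the longest run of equal suits is >= 4.
import Mathlib
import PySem

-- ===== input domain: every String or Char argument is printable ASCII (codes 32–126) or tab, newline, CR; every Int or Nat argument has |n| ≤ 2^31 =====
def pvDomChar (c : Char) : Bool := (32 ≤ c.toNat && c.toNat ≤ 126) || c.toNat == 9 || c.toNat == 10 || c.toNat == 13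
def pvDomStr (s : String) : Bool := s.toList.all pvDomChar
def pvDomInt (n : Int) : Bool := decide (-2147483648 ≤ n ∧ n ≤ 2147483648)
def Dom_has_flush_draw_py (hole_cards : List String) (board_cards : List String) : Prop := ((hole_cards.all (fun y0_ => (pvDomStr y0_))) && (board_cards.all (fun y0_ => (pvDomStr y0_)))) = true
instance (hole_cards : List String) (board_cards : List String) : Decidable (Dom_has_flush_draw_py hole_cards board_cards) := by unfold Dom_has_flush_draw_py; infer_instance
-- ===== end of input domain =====

-- B replaces A's suit->count dictionary + max over dict values by sorting the suit
-- characters and one run-length scan over the sorted list (objective: alternative).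

-- ===== PORT A =====
-- card[1]: exact on Pre_ (every indexed card has at least 2 characters)
def pvSuit (card : String) : Char := (PySem.Str.pyGet? card 1).getD ' '

def has_flush_draw_py (hole_cards : List String) (board_cards : List String) : Bool :=
  let cards := hole_cards ++ board_cards
  if cards.length < 4 then false
  else
    let suit_counts : PySem.Dict Char Int :=
      cards.foldl (fun d card => d.insert (pvSuit card) (d.getD (pvSuit card) 0 + 1))
        PySem.Dict.empty
    match PySem.List.max? suit_counts.values (fun v => v) with
    | some m => decide (4 ≤ m)
    | none => false

-- ===== PORT B =====
def has_flush_draw_py_alt (hole_cards : List String) (board_cards : List String) : Bool :=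
  let cards := hole_cards ++ board_cards
  if cards.length < 4 then false
  else
    let suits := PySem.List.sorted (cards.map pvSuit) (fun c => c) false
    let r := suits.foldl
      (fun st s =>
        let run := if some s == st.2.2 then st.2.1 + 1 else 1
        ((if run > st.1 then run else st.1), run, some s))
      ((0 : Nat), (0 : Nat), (none : Option Char))
    decide (4 ≤ r.1)

-- ===== PRECONDITION & SPEC =====
-- Pre_ excludes exactly the inputs where A raises IndexError: at least 4 cards in total
-- but some card shorter than 2 characters (card[1] fails).
def Pre_has_flush_draw_py (hole_cards : List String) (board_cards : List String) : Prop :=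
  4 ≤ (hole_cards ++ board_cards).length → ∀ card ∈ hole_cards ++ board_cards, 2 ≤ card.toList.length
instance (hole_cards : List String) (board_cards : List String) : Decidable (Pre_has_flush_draw_py hole_cards board_cards) := by unfold Pre_has_flush_draw_py; infer_instance

def pvWitness_has_flush_draw_py : List String × List String := (["Ah", "Kh"], ["Qh", "Jh", "2c"])

def Spec_has_flush_draw_py (hole_cards : List String) (board_cards : List String) (out : Bool) : Prop := out = has_flush_draw_py_alt hole_cards board_cards
instance (hole_cards : List String) (board_cards : List String) (out : Bool) : Decidable (Spec_has_flush_draw_py hole_cards board_cards out) := by unfold Spec_has_flush_draw_py; infer_instance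

-- ===== CLAIM (what is proved, stated in full; the proofs are below) =====
def Claim_equal_has_flush_draw_py : Prop := ∀ (hole_cards : List String) (board_cards : List String), Dom_has_flush_draw_py hole_cards board_cards → Pre_has_flush_draw_py hole_cards board_cards → Spec_has_flush_draw_py hole_cards board_cards (has_flush_draw_py hole_cards board_cards)

-- ===== LEMMAS AND PROOFS =====

-- B's loop body, named for the proofs.
def pvStep (st : Nat × Nat × Option Char) (s : Char) : Nat × Nat × Option Char :=
  let run := if some s == st.2.2 then st.2.1 + 1 else 1
  ((if run > st.1 then run else st.1), run, some s)

-- Invariant of B's run-length scan over a sorted (Pairwise ≤) list: the middle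
-- component is the count of the last (maximal) element, and the first component is
-- a maximal count, attained by some element (or 0 on the empty list).
def pvInv (l : List Char) (st : Nat × Nat × Option Char) : Prop :=
  (match st.2.2 with
   | none => l = [] ∧ st.1 = 0 ∧ st.2.1 = 0
   | some x => x ∈ l ∧ (∀ y ∈ l, y ≤ x) ∧ st.2.1 = l.count x)
  ∧ (∀ v ∈ l, l.count v ≤ st.1) ∧ (st.1 = 0 ∨ ∃ v ∈ l, st.1 = l.count v)

theorem pvInv_fold (l : List Char) (h : l.Pairwise (· ≤ ·)) :
    pvInv l (l.foldl pvStep (0, 0, none)) := by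
  induction l using List.reverseRecOn with
  | nil => simp [pvInv]
  | append_singleton l x ih =>
    rw [List.pairwise_append] at h
    have hl : l.Pairwise (· ≤ ·) := h.1
    have hle : ∀ y ∈ l, y ≤ x := by
      intro y hy; exact h.2.2 y hy x (by simp)
    obtain ⟨hp, hub, hat⟩ := ih hl
    rw [List.foldl_append]
    rcases hste : l.foldl pvStep (0, 0, (none : Option Char)) with ⟨b, r, p⟩
    simp only [List.foldl_cons, List.foldl_nil]
    rw [hste] at hp hub hat
    cases p with
    | none =>
      obtain ⟨hnil, hb, hr⟩ := hp
      subst hnil hb hr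
      refine ⟨⟨by simp, ?_, by simp [pvStep]⟩, ?_, ?_⟩
      · intro y hy; simp at hy; exact le_of_eq hy
      · intro v hv; simp at hv; subst hv; simp [pvStep]
      · right; exact ⟨x, by simp, by simp [pvStep]⟩
    | some m =>
      obtain ⟨hm, hmax, hr⟩ := hp
      have hr' : r = List.count m l := hr
      have hub' : ∀ v ∈ l, List.count v l ≤ b := hub
      have hat' : b = 0 ∨ ∃ v ∈ l, b = List.count v l := hat
      simp only [pvInv, pvStep]
      by_cases hxm : x = m
      · -- the new card has the same (maximal) suit: the run extends
        subst hxm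
        have hcx : (l ++ [x]).count x = l.count x + 1 := by
          simp [List.count_append]
        have hrun : (if (some x == some x) = true then r + 1 else 1) = l.count x + 1 := by
          simp [hr']
        rw [hrun]
        refine ⟨⟨by simp, ?_, hcx.symm⟩, ?_, ?_⟩
        · intro y hy
          rcases List.mem_append.mp hy with hy | hy
          · exact hmax y hy
          · simp at hy; exact le_of_eq hy
        · intro v hv
          by_cases hvx : v = x
          · subst hvx
            rw [hcx]
            split
            · exact le_refl _
            · omega
          · have hcv : (l ++ [x]).count v = l.count v := by
              simp [List.count_append, Ne.symm hvx]
            have hvl : v ∈ l := by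
              rcases List.mem_append.mp hv with h1 | h1
              · exact h1
              · simp at h1; exact absurd h1 hvx
            have := hub' v hvl
            rw [hcv]
            split <;> omega
        · split
          · right; exact ⟨x, by simp, hcx.symm⟩
          · rename_i hnb
            have hb1 : l.count x + 1 ≤ b := by omega
            rcases hat' with hb0 | ⟨v, hvl, hbv⟩
            · omega
            · right
              refine ⟨v, List.mem_append_left _ hvl, ?_⟩
              have hvx : v ≠ x := by
                intro hvx; subst hvx; omega
              have hcv : List.count v (l ++ [x]) = List.count v l := by
                simp [List.count_append, Ne.symm hvx]
              rw [hcv]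
              exact hbv
      · -- a strictly larger suit starts a new run
        have hxl : x ∉ l := by
          intro hxin
          exact hxm (le_antisymm (hmax x hxin) (hle m hm))
        have hcx : (l ++ [x]).count x = 1 := by
          simp [List.count_append, List.count_eq_zero_of_not_mem hxl]
        have hrun : (if (some x == some m) = true then r + 1 else 1) = 1 := by
          simp [hxm]
        rw [hrun]
        refine ⟨⟨by simp, ?_, hcx.symm⟩, ?_, ?_⟩
        · intro y hy
          rcases List.mem_append.mp hy with hy | hy
          · exact hle y hy
          · simp at hy; exact le_of_eq hy
        · intro v hv
          by_cases hvx : v = x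
          · subst hvx; rw [hcx]; split <;> omega
          · have hcv : (l ++ [x]).count v = l.count v := by
              simp [List.count_append, Ne.symm hvx]
            have hvl : v ∈ l := by
              rcases List.mem_append.mp hv with h1 | h1
              · exact h1
              · simp at h1; exact absurd h1 hvx
            have := hub' v hvl
            rw [hcv]
            split <;> omega
        · split
          · right; exact ⟨x, by simp, hcx.symm⟩
          · rename_i hnb
            rcases hat' with hb0 | ⟨v, hvl, hbv⟩
            · omega
            · right
              refine ⟨v, List.mem_append_left _ hvl, ?_⟩
              have hvx : v ≠ x := fun hh => hxl (hh ▸ hvl)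
              have hcv : List.count v (l ++ [x]) = List.count v l := by
                simp [List.count_append, Ne.symm hvx]
              rw [hcv]
              exact hbv

-- B's best-run ≥ 4 iff some suit occurs ≥ 4 times in the sorted list.
theorem pvBest_iff (l : List Char) (h : l.Pairwise (· ≤ ·)) :
    (4 ≤ (l.foldl pvStep (0, 0, none)).1) ↔ ∃ v ∈ l, 4 ≤ l.count v := by
  obtain ⟨hp, hub, hat⟩ := pvInv_fold l h
  constructor
  · intro h4
    rcases hat with hb0 | ⟨v, hvl, hbv⟩
    · omega
    · exact ⟨v, hvl, hbv ▸ h4⟩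
  · rintro ⟨v, hvl, hc⟩
    exact le_trans hc (hub v hvl)


-- ===== VERDICT (by name: the statement is the Claim_ definition above) =====
-- A's dict value-max ≥ 4 iff some suit occurs ≥ 4 times.
theorem pvA_iff (suits : List Char) (hne : suits ≠ []) :
    (match PySem.List.max?
        (PySem.Dict.values (suits.foldl (fun d x => d.insert x (d.getD x 0 + 1)) (PySem.Dict.empty : PySem.Dict Char Int)))
        (fun v => v) with
     | some m => decide (4 ≤ m)
     | none => false) = decide (∃ v ∈ suits, 4 ≤ suits.count v) := by
  rw [PySem.Dict.foldl_insert_getD_add_one_eq_counter]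
  have hvals : (PySem.Dict.counter suits).values
      = (PySem.Set.ofList suits).map (fun k => (suits.count k : Int)) := by
    show ((PySem.Dict.counter suits).items).map (·.2) = _
    rw [PySem.Dict.items_counter]
    simp
  rw [hvals]
  rcases hmx : PySem.List.max? ((PySem.Set.ofList suits).map (fun k => (suits.count k : Int))) (fun v => v) with _ | m
  · exfalso
    rw [PySem.List.max?_eq_none_iff] at hmx
    rcases List.exists_mem_of_ne_nil suits hne with ⟨a, ha⟩
    have : a ∈ PySem.Set.ofList suits := (PySem.Set.mem_ofList suits a).mpr ha
    have : ((suits.count a : Int)) ∈ (PySem.Set.ofList suits).map (fun k => (suits.count k : Int)) :=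
      List.mem_map_of_mem this
    rw [hmx] at this
    exact absurd this (List.not_mem_nil)
  · simp only
    rw [decide_eq_decide]
    constructor
    · intro h4
      rcases List.mem_map.mp (PySem.List.max?_mem hmx) with ⟨k, hk, hkm⟩
      refine ⟨k, (PySem.Set.mem_ofList suits k).mp hk, ?_⟩
      have : (4 : Int) ≤ (suits.count k : Int) := hkm ▸ h4
      exact_mod_cast this
    · rintro ⟨v, hv, hc⟩
      have hmem : ((suits.count v : Int)) ∈ (PySem.Set.ofList suits).map (fun k => (suits.count k : Int)) :=
        List.mem_map_of_mem ((PySem.Set.mem_ofList suits v).mpr hv)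
      have hle := PySem.List.max?_isMax hmx _ hmem
      have : (4 : Int) ≤ (suits.count v : Int) := by exact_mod_cast hc
      omega

theorem has_flush_draw_py_spec : Claim_equal_has_flush_draw_py := by
  intro hole_cards board_cards _hdom _hpre
  unfold Spec_has_flush_draw_py has_flush_draw_py has_flush_draw_py_alt
  by_cases hlen : (hole_cards ++ board_cards).length < 4
  · rw [if_pos hlen, if_pos hlen]
  · simp only [hlen, if_false]
    have hne : (hole_cards ++ board_cards).map pvSuit ≠ [] := by
      intro hnil
      rw [List.map_eq_nil_iff] at hnil
      rw [hnil] at hlen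
      simp at hlen
    set suits := (hole_cards ++ board_cards).map pvSuit with hsuits
    -- A's loop over cards keyed by pvSuit is the same loop over the suit list
    have hfoldA : (hole_cards ++ board_cards).foldl
        (fun d card => d.insert (pvSuit card) (d.getD (pvSuit card) 0 + 1)) (PySem.Dict.empty : PySem.Dict Char Int)
        = suits.foldl (fun d x => d.insert x (d.getD x 0 + 1)) (PySem.Dict.empty : PySem.Dict Char Int) := by
      rw [hsuits, List.foldl_map]
    rw [hfoldA, pvA_iff suits hne]
    -- B's run-length scan over the sorted suit list
    set ssort := PySem.List.sorted suits (fun c => c) false with hss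
    have hpair : ssort.Pairwise (· ≤ ·) := PySem.List.sorted_pairwise suits (fun c => c)
    have hperm : ssort.Perm suits := PySem.List.sorted_perm suits (fun c => c) false
    have hB := pvBest_iff ssort hpair
    rw [decide_eq_decide]
    rw [show (fun (st : Nat × Nat × Option Char) (s : Char) =>
        ((if (if some s == st.2.2 then st.2.1 + 1 else 1) > st.1
          then (if some s == st.2.2 then st.2.1 + 1 else 1) else st.1),
         (if some s == st.2.2 then st.2.1 + 1 else 1), some s)) = pvStep from rfl]
    rw [hB]
    constructor
    · rintro ⟨v, hv, hc⟩
      exact ⟨v, hperm.mem_iff.mpr hv, by rwa [hperm.count_eq]⟩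
    · rintro ⟨v, hv, hc⟩
      exact ⟨v, hperm.mem_iff.mp hv, by rwa [hperm.count_eq] at hc⟩
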